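-- pv_equiv track=rewrite | github.com/Sdefendre/SocialMediaManagerAgent | _archive/Skills_old/image_generator/generator.py | _create_prompt_from_content
-- ===== SOURCE A (Python) =====
-- def _create_prompt_from_content(content: str) -> str:
--     """Create an image generation prompt from post content"""
--     # Extract key themes
--     themes = []
--
--     if any(word in content.lower() for word in ['ai', 'artificial intelligence', 'automation']):
--         themes.append('AI technology')
--     if any(word in content.lower() for word in ['business', 'company', 'startup']):
--         themes.append('business')
--     if any(word in content.lower() for word in ['veteran', 'military', 'service']):
--         themes.append('veteran')
--     if any(word in content.lower() for word in ['code', 'developer', 'software']):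
--         themes.append('software development')
--
--     theme_str = ' and '.join(themes) if themes else 'technology and business'
--
--     return f"Professional social media image representing {theme_str}, modern minimalist style, clean composition, blue and white color scheme with subtle accents, optimized for social media sharing, photorealistic"
-- ===== SOURCE B (Python) =====
-- _KEYWORD_LABELS = [
--     ('ai', 'AI technology'), ('artificial intelligence', 'AI technology'), ('automation', 'AI technology'),
--     ('business', 'business'), ('company', 'business'), ('startup', 'business'),
--     ('veteran', 'veteran'), ('military', 'veteran'), ('service', 'veteran'),
--     ('code', 'software development'), ('developer', 'software development'), ('software', 'software development'),
-- ]
-- _LABELS = ['AI technology', 'business', 'veteran', 'software development']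
--
--
-- def _create_prompt_from_content(content: str) -> str:
--     """Create an image generation prompt from post content"""
--     # Single left-to-right scan over the lowered content: at each position try
--     # every keyword as a prefix, collecting the matched labels in a set.
--     lowered = content.lower()
--     found = set()
--     for i in range(len(lowered)):
--         for kw, label in _KEYWORD_LABELS:
--             if lowered.startswith(kw, i):
--                 found.add(label)
--     themes = [label for label in _LABELS if label in found]
--     theme_str = ' and '.join(themes) if themes else 'technology and business'
--     return f"Professional social media image representing {theme_str}, modern minimalist style, clean composition, blue and white color scheme with subtle accents, optimized for social media sharing, photorealistic"
-- ===== Notes on version B (the rewrite author's own statement) =====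
-- stated objective: alternative
-- what changed: Replaces the four per-theme any(substring-in) tests by a single left-to-right scan over the lowered content that tries every keyword as a prefix at each position, accumulating matched labels in a set, then emits the labels in fixed order.
import Mathlib
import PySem

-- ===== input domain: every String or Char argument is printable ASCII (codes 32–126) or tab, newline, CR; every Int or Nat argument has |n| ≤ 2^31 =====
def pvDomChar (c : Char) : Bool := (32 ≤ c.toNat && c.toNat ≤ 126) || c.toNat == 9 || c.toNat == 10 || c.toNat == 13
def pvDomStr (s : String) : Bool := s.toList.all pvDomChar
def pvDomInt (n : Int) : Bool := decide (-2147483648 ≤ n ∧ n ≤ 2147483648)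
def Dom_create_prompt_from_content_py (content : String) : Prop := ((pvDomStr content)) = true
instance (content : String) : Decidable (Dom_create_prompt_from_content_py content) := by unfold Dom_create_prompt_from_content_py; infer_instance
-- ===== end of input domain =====

-- B replaces the four any(substring-in) tests by a single left-to-right prefix scan
-- over the lowered content, collecting matched labels in a set (same return value).

-- ===== PORT A =====
def create_prompt_from_content_py (content : String) : String :=
  let themes : List String := []
  let themes := if ["ai", "artificial intelligence", "automation"].any
      (fun word => PySem.Str.isIn word (PySem.Str.lower content)) then themes ++ ["AI technology"] else themes
  let themes := if ["business", "company", "startup"].any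
      (fun word => PySem.Str.isIn word (PySem.Str.lower content)) then themes ++ ["business"] else themes
  let themes := if ["veteran", "military", "service"].any
      (fun word => PySem.Str.isIn word (PySem.Str.lower content)) then themes ++ ["veteran"] else themes
  let themes := if ["code", "developer", "software"].any
      (fun word => PySem.Str.isIn word (PySem.Str.lower content)) then themes ++ ["software development"] else themes
  let theme_str := if themes ≠ [] then PySem.Str.join " and " themes else "technology and business"
  "Professional social media image representing " ++ theme_str ++ ", modern minimalist style, clean composition, blue and white color scheme with subtle accents, optimized for social media sharing, photorealistic"

-- ===== PORT B =====
def pvKeywordLabels : List (String × String) :=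
  [("ai", "AI technology"), ("artificial intelligence", "AI technology"), ("automation", "AI technology"),
   ("business", "business"), ("company", "business"), ("startup", "business"),
   ("veteran", "veteran"), ("military", "veteran"), ("service", "veteran"),
   ("code", "software development"), ("developer", "software development"), ("software", "software development")]

def pvLabels : List String := ["AI technology", "business", "veteran", "software development"]

-- the scan loop of Source B: for i in range(len(lowered)): for kw, label in _KEYWORD_LABELS:
--   if lowered.startswith(kw, i): found.add(label)
-- (lowered.startswith(kw, i) with 0 ≤ i < len is exactly "kw is a prefix of lowered[i:]")
def pvScan (chars : List Char) : PySem.Set String :=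
  (List.range chars.length).foldl
    (fun found i => pvKeywordLabels.foldl
        (fun found p => if p.1.toList.isPrefixOf (chars.drop i) then PySem.Set.add found p.2 else found)
        found)
    PySem.Set.empty

def create_prompt_from_content_py_alt (content : String) : String :=
  let lowered := PySem.Str.lower content
  let found := pvScan lowered.toList
  let themes := pvLabels.filter (fun lab => PySem.Set.contains found lab)
  let theme_str := if themes ≠ [] then PySem.Str.join " and " themes else "technology and business"
  "Professional social media image representing " ++ theme_str ++ ", modern minimalist style, clean composition, blue and white color scheme with subtle accents, optimized for social media sharing, photorealistic"

-- ===== PRECONDITION & SPEC =====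
def Spec_create_prompt_from_content_py (content : String) (out : String) : Prop := out = create_prompt_from_content_py_alt content
instance (content : String) (out : String) : Decidable (Spec_create_prompt_from_content_py content out) := by unfold Spec_create_prompt_from_content_py; infer_instance

-- ===== CLAIM (what is proved, stated in full; the proofs are below) =====
def Claim_equal_create_prompt_from_content_py : Prop := ∀ (content : String), Dom_create_prompt_from_content_py content → Spec_create_prompt_from_content_py content (create_prompt_from_content_py content)

-- ===== LEMMAS AND PROOFS =====

theorem pv_mem_inner (ps : List (String × String)) (c : String × String → Bool)
    (s : PySem.Set String) (x : String) :
    x ∈ ps.foldl (fun s p => if c p then PySem.Set.add s p.2 else s) s ↔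
      x ∈ s ∨ ∃ p ∈ ps, c p = true ∧ x = p.2 := by
  induction ps generalizing s with
  | nil => simp
  | cons p ps ih =>
    simp only [List.foldl_cons, ih]
    by_cases h : c p = true
    · simp only [h, if_pos, PySem.Set.mem_add, List.exists_mem_cons_iff]
      tauto
    · simp only [h, Bool.false_eq_true, List.exists_mem_cons_iff]
      tauto

theorem pv_mem_scan_aux (chars : List Char) (is : List Nat) (s : PySem.Set String) (x : String) :
    x ∈ is.foldl
        (fun found i => pvKeywordLabels.foldl
          (fun found p => if p.1.toList.isPrefixOf (chars.drop i) then PySem.Set.add found p.2 else found)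
          found) s ↔
      x ∈ s ∨ ∃ i ∈ is, ∃ p ∈ pvKeywordLabels,
        p.1.toList.isPrefixOf (chars.drop i) = true ∧ x = p.2 := by
  induction is generalizing s with
  | nil => simp
  | cons i is ih =>
    simp only [List.foldl_cons, ih, pv_mem_inner, List.exists_mem_cons_iff]
    exact or_assoc

theorem pv_mem_scan (chars : List Char) (x : String) :
    x ∈ pvScan chars ↔
      ∃ i ∈ List.range chars.length, ∃ p ∈ pvKeywordLabels,
        p.1.toList.isPrefixOf (chars.drop i) = true ∧ x = p.2 := by
  unfold pvScan
  rw [pv_mem_scan_aux]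
  simp [PySem.Set.empty]

theorem pv_exists_lt_prefix_iff (kw : List Char) (h : kw ≠ []) (L : List Char) :
    (∃ i ∈ List.range L.length, kw.isPrefixOf (L.drop i) = true) ↔
      PySem.Chars.isIn kw L = true := by
  rw [← PySem.Chars.exists_prefix_drop_iff_isIn]
  constructor
  · rintro ⟨i, _, hp⟩
    exact ⟨i, List.isPrefixOf_iff_prefix.mp hp⟩
  · rintro ⟨j, hj⟩
    by_cases hlt : j < L.length
    · exact ⟨j, List.mem_range.mpr hlt, List.isPrefixOf_iff_prefix.mpr hj⟩
    · exfalso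
      have : L.drop j = [] := List.drop_eq_nil_of_le (le_of_not_gt hlt)
      rw [this] at hj
      exact h (List.prefix_nil.mp hj)

theorem pv_group (L : List Char) (lab : String) :
    PySem.Set.contains (pvScan L) lab =
      (pvKeywordLabels.any (fun p => p.2 == lab && PySem.Chars.isIn p.1.toList L)) := by
  rw [Bool.eq_iff_iff, PySem.Set.contains_iff, pv_mem_scan, List.any_eq_true]
  constructor
  · rintro ⟨i, hi, p, hp, hpref, heq⟩
    refine ⟨p, hp, ?_⟩
    rw [Bool.and_eq_true, beq_iff_eq]
    refine ⟨heq.symm, ?_⟩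
    rw [← PySem.Chars.exists_prefix_drop_iff_isIn]
    exact ⟨i, List.isPrefixOf_iff_prefix.mp hpref⟩
  · rintro ⟨p, hp, h⟩
    rw [Bool.and_eq_true, beq_iff_eq] at h
    have hne : p.1.toList ≠ [] := by
      fin_cases hp <;> decide
    obtain ⟨i, hi, hpref⟩ := (pv_exists_lt_prefix_iff p.1.toList hne L).mpr h.2
    exact ⟨i, hi, p, hp, hpref, h.1.symm⟩

-- ===== VERDICT (by name: the statement is the Claim_ definition above) =====
set_option maxHeartbeats 1000000 in
theorem create_prompt_from_content_py_spec : Claim_equal_create_prompt_from_content_py := by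
  intro content _
  unfold Spec_create_prompt_from_content_py create_prompt_from_content_py create_prompt_from_content_py_alt
  simp only [pvLabels, List.filter_cons, List.filter_nil, pv_group, pvKeywordLabels,
    List.any_cons, List.any_nil, PySem.Str.isIn_eq, Bool.or_false]
  by_cases hb1 : (PySem.Chars.isIn "ai".toList (PySem.Str.lower content).toList ||
      (PySem.Chars.isIn "artificial intelligence".toList (PySem.Str.lower content).toList ||
        PySem.Chars.isIn "automation".toList (PySem.Str.lower content).toList)) = true <;>
  by_cases hb2 : (PySem.Chars.isIn "business".toList (PySem.Str.lower content).toList ||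
      (PySem.Chars.isIn "company".toList (PySem.Str.lower content).toList ||
        PySem.Chars.isIn "startup".toList (PySem.Str.lower content).toList)) = true <;>
  by_cases hb3 : (PySem.Chars.isIn "veteran".toList (PySem.Str.lower content).toList ||
      (PySem.Chars.isIn "military".toList (PySem.Str.lower content).toList ||
        PySem.Chars.isIn "service".toList (PySem.Str.lower content).toList)) = true <;>
  by_cases hb4 : (PySem.Chars.isIn "code".toList (PySem.Str.lower content).toList ||
      (PySem.Chars.isIn "developer".toList (PySem.Str.lower content).toList ||
        PySem.Chars.isIn "software".toList (PySem.Str.lower content).toList)) = true <;>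
  simp_all [PySem.Str.join]
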